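-- pv_equiv track=rewrite | github.com/sdownin/compnet-venus | python/split_sdc_relations.py | dedupDict
-- ===== SOURCE A (Python) =====
-- def dedupDict(heading_map):
--    """ fix duplicate values in a dict mapping by count indexing each
--        after the first val,val_2,val_3,...
--    """
--    if not isinstance(heading_map, dict):
--       raise Exception('heading_map must be a dict-like object')
--    check = {}
--    for key in heading_map.keys():
--       val = heading_map[key]
--       check[val] = check[val]+1 if val in check else 1
--       if check[val] > 1:
--          heading_map[key] = '{h}_{i}'.format(h=val,i=check[val])
--    return heading_map
-- ===== SOURCE B (Python) =====
-- def dedupDict(heading_map):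
--    """ fix duplicate values in a dict mapping by count indexing each
--        after the first val,val_2,val_3,...
--    """
--    if not isinstance(heading_map, dict):
--       raise Exception('heading_map must be a dict-like object')
--    # group the keys by their (original) value, in insertion order
--    groups = {}
--    for key, val in heading_map.items():
--       groups.setdefault(val, []).append(key)
--    # within each group the first key keeps the value; the i-th later key gets val_(i+2)
--    rename = {key: '{h}_{i}'.format(h=val, i=i + 2)
--              for val, keys in groups.items()
--              for i, key in enumerate(keys[1:])}
--    for key, new in rename.items():
--       heading_map[key] = new
--    return heading_map
-- ===== Notes on version B (the rewrite author's own statement) =====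
-- stated objective: alternative
-- what changed: Replaces A's single pass with a running value-counter dict by a two-phase decomposition: first group the keys by value into an index dict, then compute a rename table from each group's rank (keys[1:] get val_(i+2)) and apply it; number of passes and the maintained state both change.
import Mathlib
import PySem

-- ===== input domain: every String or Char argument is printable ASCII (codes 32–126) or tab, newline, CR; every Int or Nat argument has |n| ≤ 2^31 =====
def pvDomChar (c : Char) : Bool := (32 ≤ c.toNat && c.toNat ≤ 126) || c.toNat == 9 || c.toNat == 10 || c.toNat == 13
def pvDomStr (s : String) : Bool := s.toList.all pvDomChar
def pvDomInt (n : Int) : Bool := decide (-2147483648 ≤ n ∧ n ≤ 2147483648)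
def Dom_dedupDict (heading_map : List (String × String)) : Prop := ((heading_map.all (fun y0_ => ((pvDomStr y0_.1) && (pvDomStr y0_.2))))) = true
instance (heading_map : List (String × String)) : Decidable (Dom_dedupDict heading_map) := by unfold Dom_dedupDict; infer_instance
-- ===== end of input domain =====

-- B replaces A's one pass with a running value-counter by a two-phase decomposition (group keys by value, then rename each group's later keys by rank); equivalence is about the RETURN value (both Pythons also mutate their dict argument in place, identically).


-- '{h}_{i}'.format(h=val, i=c): the string both Pythons build
def fmt (h : String) (i : Int) : String := PySem.Str.join "" [h, "_", PySem.Int.toStr i]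

-- ===== PORT A =====
-- the body of A's for-loop over heading_map.keys(), state = (heading_map, check)
def stepA (st : PySem.Dict String String × PySem.Dict String Int) (key : String) :
    PySem.Dict String String × PySem.Dict String Int :=
  let val := (st.1.get? key).getD ""
  let cnt : Int := if st.2.contains val then st.2.getD val 0 + 1 else 1
  let check := st.2.insert val cnt
  let d := if check.getD val 0 > 1 then st.1.insert key (fmt val (check.getD val 0)) else st.1
  (d, check)

def dedupDict (heading_map : List (String × String)) : List (String × String) :=
  let d0 : PySem.Dict String String := PySem.Dict.mk heading_map
  -- heading_map[key] never raises: inserts only overwrite, so every key of d0 stays present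
  let st := d0.keys.foldl stepA (d0, PySem.Dict.empty)
  st.1.items

-- ===== PORT B =====
def dedupDict_alt (heading_map : List (String × String)) : List (String × String) :=
  let d : PySem.Dict String String := PySem.Dict.mk heading_map
  let groups : PySem.Dict String (List String) :=
    d.items.foldl (fun g p => g.modify p.2 [] (· ++ [p.1])) PySem.Dict.empty
  let rename : PySem.Dict String String :=
    (groups.items.flatMap (fun gp =>
      (PySem.List.enumerate (gp.2.drop 1)).map (fun ik => (ik.2, fmt gp.1 (ik.1 + 2))))).foldl
      (fun dd q => dd.insert q.1 q.2) PySem.Dict.empty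
  let d' := rename.items.foldl (fun dd q => dd.insert q.1 q.2) d
  d'.items

-- ===== PRECONDITION & SPEC =====
-- Pre_ only states that the input encodes a Python dict: dict keys are unique, so an
-- association list with duplicate keys represents no dict A can receive at all.
def Pre_dedupDict (heading_map : List (String × String)) : Prop :=
  (heading_map.map (·.1)).Nodup
instance (heading_map : List (String × String)) : Decidable (Pre_dedupDict heading_map) := by unfold Pre_dedupDict; infer_instance
def pvWitness_dedupDict : (List (String × String)) := [("a", "x"), ("b", "x"), ("c", "y"), ("d", "x")]

def Spec_dedupDict (heading_map : List (String × String)) (out : List (String × String)) : Prop := out = dedupDict_alt heading_map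
instance (heading_map : List (String × String)) (out : List (String × String)) : Decidable (Spec_dedupDict heading_map out) := by unfold Spec_dedupDict; infer_instance

-- ===== CLAIM (what is proved, stated in full; the proofs are below) =====
def Claim_equal_dedupDict : Prop := ∀ (heading_map : List (String × String)), Dom_dedupDict heading_map → Pre_dedupDict heading_map → Spec_dedupDict heading_map (dedupDict heading_map)

-- ===== LEMMAS AND PROOFS =====
def finalVal (pre : List String) (v : String) : String :=
  if ((pre.count v : Int) + 1) > 1 then fmt v ((pre.count v : Int) + 1) else v

def refRun (pre : List String) : List (String × String) → List (String × String)
  | [] => []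
  | (k, v) :: rest => (k, finalVal pre v) :: refRun (pre ++ [v]) (rest)

theorem get?_mk_append_notmem (l1 l2 : List (String × String)) (k : String)
    (h : k ∉ l1.map (·.1)) :
    (PySem.Dict.mk (l1 ++ l2)).get? k = (PySem.Dict.mk l2).get? k := by
  induction l1 with
  | nil => rfl
  | cons p t ih =>
    simp only [List.map_cons, List.mem_cons, not_or] at h
    rw [List.cons_append, PySem.Dict.get?_mk_cons]
    simp only [beq_iff_eq]
    rw [if_neg (by exact fun hc => h.1 (by simp [hc])), ih h.2]

theorem map_replace_notmem (l : List (String × String)) (k : String) (w : String)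
    (h : k ∉ l.map (·.1)) :
    l.map (fun p => if (p.1 == k) = true then (k, w) else p) = l := by
  induction l with
  | nil => rfl
  | cons p t ih =>
    simp only [List.map_cons, List.mem_cons, not_or] at h
    rw [List.map_cons, ih h.2, if_neg (by simp only [beq_iff_eq]; exact fun hk => h.1 (by simp [hk]))]

theorem insert_mk_mid (l1 l2 : List (String × String)) (k v w : String)
    (h1 : k ∉ l1.map (·.1)) (h2 : k ∉ l2.map (·.1)) :
    (PySem.Dict.mk (l1 ++ (k, v) :: l2)).insert k w = PySem.Dict.mk (l1 ++ (k, w) :: l2) := by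
  have hc : (PySem.Dict.mk (l1 ++ (k, v) :: l2)).contains k = true := by
    simp [PySem.Dict.contains_mk]
  have := PySem.Dict.items_insert_of_contains (PySem.Dict.mk (l1 ++ (k, v) :: l2)) w hc
  apply PySem.Dict.ext
  rw [this]
  show (l1 ++ (k, v) :: l2).map _ = _
  rw [List.map_append, List.map_cons]
  rw [map_replace_notmem l1 k w h1]
  simp only [beq_self_eq_true, if_true]
  rw [map_replace_notmem l2 k w h2]

theorem A_inv (rest : List (String × String)) : ∀ (pre : List (String × String)) (done : List String),
    ((pre ++ rest).map (·.1)).Nodup →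
    ((rest.map (·.1)).foldl stepA (PySem.Dict.mk (pre ++ rest), PySem.Dict.counter done)).1.items
      = pre ++ refRun done rest := by
  induction rest with
  | nil => intro pre done h; simp [refRun]
  | cons p r ih =>
    intro pre done h
    obtain ⟨k, v⟩ := p
    have hkpre : k ∉ pre.map (·.1) := by
      have := h; simp only [List.map_append, List.nodup_append, List.map_cons] at this
      exact fun hm => this.2.2 k hm k (by simp) rfl
    have hkr : k ∉ r.map (·.1) := by
      have := h; simp only [List.map_append, List.nodup_append, List.map_cons] at this
      exact (List.nodup_cons.mp this.2.1).1
    rw [List.map_cons, List.foldl_cons]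
    have hval : ((PySem.Dict.mk (pre ++ (k, v) :: r)).get? k).getD "" = v := by
      rw [get?_mk_append_notmem _ _ _ hkpre, PySem.Dict.get?_mk_cons]
      simp
    have hcnt : (if (PySem.Dict.counter done).contains v then ((done.count v : Int)) + 1 else 1)
        = (done.count v : Int) + 1 := by
      by_cases hc : (PySem.Dict.counter done).contains v = true
      · rw [if_pos hc]
      · rw [if_neg hc]
        have hv : v ∉ done := by
          intro hv
          exact hc (by rw [PySem.Dict.contains_counter]; simp [hv])
        rw [List.count_eq_zero.mpr hv]
        simp
    have hcheck : (PySem.Dict.counter done).insert v ((done.count v : Int) + 1)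
        = PySem.Dict.counter (done ++ [v]) := by
      rw [PySem.Dict.counter_append_singleton]
      simp [PySem.Dict.modify, PySem.Dict.getD_counter]
    have hstep : stepA (PySem.Dict.mk (pre ++ (k, v) :: r), PySem.Dict.counter done) k
        = (PySem.Dict.mk ((pre ++ [(k, finalVal done v)]) ++ r), PySem.Dict.counter (done ++ [v])) := by
      unfold stepA
      simp only [hval, PySem.Dict.getD_counter]
      rw [hcnt, hcheck, PySem.Dict.getD_counter]
      have hca : (done ++ [v]).count v = done.count v + 1 := by simp
      rw [hca]
      push_cast
      by_cases h0 : done.count v = 0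
      · rw [if_neg (by simp [h0]), Prod.mk.injEq]
        refine ⟨by apply PySem.Dict.ext; simp [finalVal, h0], rfl⟩
      · rw [if_pos (by omega), Prod.mk.injEq]
        constructor
        · rw [insert_mk_mid _ _ _ v _ hkpre hkr]
          have : finalVal done v = fmt v ((done.count v : Int) + 1) := by
            rw [finalVal, if_pos (by omega)]
          rw [this]
          apply PySem.Dict.ext
          simp
        · rfl
    rw [hstep]
    rw [ih (pre ++ [(k, finalVal done v)]) (done ++ [v]) (by
      simp only [List.map_append, List.map_cons] at h ⊢
      simpa using h)]
    simp [refRun]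

theorem A_eq_ref (hm : List (String × String)) (h : (hm.map (·.1)).Nodup) :
    dedupDict hm = refRun [] hm := by
  have := A_inv hm [] [] (by simpa using h)
  simpa [dedupDict, PySem.Dict.keys, PySem.Dict.counter] using this

def keysOf (hm : List (String × String)) (c : String) : List String :=
  (hm.filter (fun p => p.2 == c)).map (·.1)

def valsOf (hm : List (String × String)) : List String :=
  PySem.Set.ofList (hm.map (·.2))

def asgOf (hm : List (String × String)) : List (String × String) :=
  (valsOf hm).flatMap (fun c =>
    (PySem.List.enumerate ((keysOf hm c).drop 1)).map (fun ik => (ik.2, fmt c (ik.1 + 2))))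

theorem groups_items (hm : List (String × String)) :
    (hm.foldl (fun g p => g.modify p.2 [] (· ++ [p.1])) PySem.Dict.empty).items
      = (valsOf hm).map (fun c => (c, keysOf hm c)) := by
  set G := hm.foldl (fun g p => g.modify p.2 [] (· ++ [p.1])) PySem.Dict.empty with hG
  have hkeys : G.keys = valsOf hm := by
    rw [hG]
    have := PySem.Dict.keys_foldl_modify_key hm (fun p => p.2) [] (fun _ p => (· ++ [p.1])) PySem.Dict.empty
    exact this
  have hnd : G.keys.Nodup := by
    rw [hkeys]; exact PySem.Set.nodup_ofList _
  have hgetD : ∀ c, G.getD c [] = keysOf hm c := by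
    intro c
    rw [hG]
    have hswap : hm.foldl (fun g p => g.modify p.2 [] (· ++ [p.1])) PySem.Dict.empty
        = (hm.map (fun p => (p.2, p.1))).foldl (fun g q => g.modify q.1 [] (· ++ [q.2])) PySem.Dict.empty := by
      rw [List.foldl_map]
    rw [hswap, PySem.Dict.getD_foldl_modify_append]
    simp [keysOf, List.filter_map, Function.comp_def]
  rw [PySem.Dict.items_eq_map_keys G hnd [], hkeys]
  exact List.map_congr_left (fun c _ => by rw [hgetD c])

theorem enum_map_snd (ks : List String) : ∀ s : Int, (PySem.List.enumerate ks s).map (·.2) = ks := by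
  induction ks with
  | nil => intro s; rfl
  | cons x t ih => intro s; simp [PySem.List.enumerate, ih]

theorem mem_keysOf (hm : List (String × String)) (c k : String) :
    k ∈ keysOf hm c ↔ (k, c) ∈ hm := by
  simp only [keysOf, List.mem_map, List.mem_filter]
  constructor
  · rintro ⟨p, ⟨hp, hc⟩, rfl⟩
    simp only [beq_iff_eq] at hc
    exact hc ▸ hp
  · intro h
    exact ⟨(k, c), ⟨h, by simp⟩, rfl⟩

theorem nodup_keysOf (hm : List (String × String)) (h : (hm.map (·.1)).Nodup) (c : String) :
    (keysOf hm c).Nodup := by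
  unfold keysOf
  have : List.Sublist ((hm.filter (fun p => p.2 == c)).map (·.1)) (hm.map (·.1)) :=
    (List.filter_sublist.map _)
  exact h.sublist this

theorem val_unique (hm : List (String × String)) (h : (hm.map (·.1)).Nodup)
    {k a b : String} (h1 : (k, a) ∈ hm) (h2 : (k, b) ∈ hm) : a = b := by
  have : ((k, a) : String × String) = (k, b) := by
    apply List.inj_on_of_nodup_map (by simpa [Function.comp_def] using h) h1 h2 rfl
  exact congrArg Prod.snd this

theorem asg_keys (hm : List (String × String)) :
    (asgOf hm).map (·.1) = (valsOf hm).flatMap (fun c => (keysOf hm c).drop 1) := by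
  unfold asgOf
  rw [List.map_flatMap]
  congr 1
  funext c
  rw [List.map_map]
  exact enum_map_snd _ 0

theorem nodup_asg_keys (hm : List (String × String)) (h : (hm.map (·.1)).Nodup) :
    ((asgOf hm).map (·.1)).Nodup := by
  rw [asg_keys]
  rw [List.nodup_flatMap]
  constructor
  · intro c _
    exact ((nodup_keysOf hm h c).sublist (List.drop_sublist _ _))
  · apply List.Nodup.pairwise_of_forall_ne (PySem.Set.nodup_ofList (hm.map (·.2)))
    intro a _ b _ hab x hxa hxb
    have h1 : (x, a) ∈ hm := (mem_keysOf hm a x).1 (List.mem_of_mem_drop hxa)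
    have h2 : (x, b) ∈ hm := (mem_keysOf hm b x).1 (List.mem_of_mem_drop hxb)
    exact hab (val_unique hm h h1 h2)

theorem B_unfold (hm : List (String × String)) (h : (hm.map (·.1)).Nodup) :
    dedupDict_alt hm
      = ((asgOf hm).foldl (fun dd q => dd.insert q.1 q.2) (PySem.Dict.mk hm)).items := by
  simp only [dedupDict_alt]
  have hasg : ((PySem.Dict.mk hm).items.foldl (fun g p => g.modify p.2 [] (· ++ [p.1]))
        PySem.Dict.empty).items.flatMap (fun gp =>
      (PySem.List.enumerate (gp.2.drop 1)).map (fun ik => (ik.2, fmt gp.1 (ik.1 + 2))))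
      = asgOf hm := by
    show ((List.foldl (fun g p => g.modify p.2 [] (· ++ [p.1])) PySem.Dict.empty hm).items).flatMap
        (fun gp => (PySem.List.enumerate (gp.2.drop 1)).map (fun ik => (ik.2, fmt gp.1 (ik.1 + 2)))) = asgOf hm
    rw [groups_items, List.flatMap_map]
    rfl
  rw [hasg]
  have hfresh : ((asgOf hm).foldl (fun dd q => dd.insert q.1 q.2) PySem.Dict.empty).items
      = asgOf hm := by
    have := PySem.Dict.items_foldl_insert_fresh (asgOf hm) Prod.fst Prod.snd PySem.Dict.empty
      (fun a _ => by simp [PySem.Dict.contains_empty]) (by simpa using nodup_asg_keys hm h)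
    simpa using this
  rw [hfresh]

theorem foldl_insert_items (asg : List (String × String)) : ∀ (L : List (String × String)),
    (L.map (·.1)).Nodup → (asg.map (·.1)).Nodup → (∀ q ∈ asg, q.1 ∈ L.map (·.1)) →
    (asg.foldl (fun dd q => dd.insert q.1 q.2) (PySem.Dict.mk L)).items
      = L.map (fun p => ((PySem.Dict.mk asg).get? p.1).elim p (fun w => (p.1, w))) := by
  induction asg with
  | nil =>
    intro L _ _ _
    show L = _
    have : ∀ p : String × String, ((PySem.Dict.mk ([] : List (String × String))).get? p.1).elim p (fun w => (p.1, w)) = p := by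
      intro p; rfl
    simp [this]
  | cons q t ih =>
    intro L hL ht hmem
    rw [List.foldl_cons]
    have hc : (PySem.Dict.mk L).contains q.1 = true := by
      rw [PySem.Dict.contains_mk]
      have := hmem q (by simp)
      rw [List.mem_map] at this
      obtain ⟨p, hp, hk⟩ := this
      exact List.any_eq_true.mpr ⟨p, hp, by simp [hk]⟩
    have hins : (PySem.Dict.mk L).insert q.1 q.2
        = PySem.Dict.mk (L.map (fun p => if p.1 == q.1 then (q.1, q.2) else p)) := by
      apply PySem.Dict.ext
      rw [PySem.Dict.items_insert_of_contains _ _ hc]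
    rw [hins]
    set L' := L.map (fun p => if p.1 == q.1 then (q.1, q.2) else p) with hL'
    have hkeysL' : L'.map (·.1) = L.map (·.1) := by
      rw [hL', List.map_map]
      apply List.map_congr_left
      intro p _
      by_cases hpq : p.1 == q.1
      · simp only [Function.comp_def, if_pos hpq]
        simp only [beq_iff_eq] at hpq
        simp [hpq]
      · simp only [Function.comp_def, if_neg hpq]
    have hq1t : q.1 ∉ t.map (·.1) := by
      have := ht
      simp only [List.map_cons, List.nodup_cons] at this
      exact this.1
    rw [ih L' (by rw [hkeysL']; exact hL) (by
        have := ht; simp only [List.map_cons, List.nodup_cons] at this; exact this.2)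
      (by intro p hp; rw [hkeysL']; exact hmem p (by simp [hp]))]
    rw [hL', List.map_map]
    apply List.map_congr_left
    intro p _
    simp only [Function.comp_def]
    rw [PySem.Dict.get?_mk_cons]
    by_cases hpq : p.1 = q.1
    · rw [if_pos (by simp [hpq]), if_pos (by simp [hpq])]
      have hnone : (PySem.Dict.mk t).get? q.1 = none := by
        rw [PySem.Dict.get?_eq_none_iff_not_mem_keys]
        simpa [PySem.Dict.keys] using hq1t
      show ((PySem.Dict.mk t).get? q.1).elim (q.1, q.2) (fun w => (q.1, w)) = _
      rw [hnone, hpq]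
      rfl
    · rw [if_neg (by simp [hpq]), if_neg (by simp only [beq_iff_eq]; exact fun hx => hpq hx.symm)]

def chunkFn (hm : List (String × String)) (c : String) : List (String × String) :=
  (PySem.List.enumerate ((keysOf hm c).drop 1)).map (fun ik => (ik.2, fmt c (ik.1 + 2)))

theorem chunk_keys (hm : List (String × String)) (c : String) :
    (chunkFn hm c).map (·.1) = (keysOf hm c).drop 1 := by
  rw [chunkFn, List.map_map]
  exact enum_map_snd _ 0

theorem asgOf_eq_flatMap_chunk (hm : List (String × String)) :
    asgOf hm = (valsOf hm).flatMap (chunkFn hm) := rfl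

theorem flatMap_chunk_keys (hm : List (String × String)) (V : List String) :
    (V.flatMap (chunkFn hm)).map (·.1) = V.flatMap (fun c => (keysOf hm c).drop 1) := by
  rw [List.map_flatMap]
  congr 1
  funext c
  exact chunk_keys hm c

theorem get?_chunk_found (g : Int → String) (k : String) (D : List String) :
    ∀ (C : List String) (s : Int), k ∉ C →
    (PySem.Dict.mk ((PySem.List.enumerate (C ++ k :: D) s).map (fun ik => (ik.2, g ik.1)))).get? k
      = some (g (s + C.length)) := by
  intro C
  induction C with
  | nil =>
    intro s _
    simp only [List.nil_append, PySem.List.enumerate, List.map_cons]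
    rw [PySem.Dict.get?_mk_cons]
    simp
  | cons c C' ih =>
    intro s hk
    simp only [List.mem_cons, not_or] at hk
    simp only [List.cons_append, PySem.List.enumerate, List.map_cons]
    rw [PySem.Dict.get?_mk_cons, if_neg (by simp only [beq_iff_eq]; exact fun h => hk.1 h.symm)]
    rw [ih (s + 1) hk.2]
    congr 2
    simp only [List.length_cons]
    push_cast
    omega

theorem get?_flatMap_none (hm : List (String × String)) (k v : String)
    (hv : ∀ c, k ∈ keysOf hm c → c = v) :
    ∀ (V : List String), v ∉ V →
    (PySem.Dict.mk (V.flatMap (chunkFn hm))).get? k = none := by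
  intro V
  induction V with
  | nil => intro _; rfl
  | cons c V' ih =>
    intro hvm
    simp only [List.mem_cons, not_or] at hvm
    rw [List.flatMap_cons]
    rw [get?_mk_append_notmem _ _ _ (by
      rw [chunk_keys]
      intro hk
      exact hvm.1 ((hv c (List.mem_of_mem_drop hk)).symm))]
    exact ih hvm.2

theorem get?_mk_append_mem (l1 l2 : List (String × String)) (k : String) (w : String)
    (h : (PySem.Dict.mk l1).get? k = some w) :
    (PySem.Dict.mk (l1 ++ l2)).get? k = some w := by
  simp only [PySem.Dict.get?] at h ⊢
  rw [List.find?_append]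
  cases hf : List.find? (fun p => p.1 == k) l1 with
  | none => rw [hf] at h; simp at h
  | some p => rw [hf] at h; simpa using h

theorem lookup_asg (pre post : List (String × String)) (k v : String)
    (h : ((pre ++ (k, v) :: post).map (·.1)).Nodup) :
    (PySem.Dict.mk (asgOf (pre ++ (k, v) :: post))).get? k
      = if (pre.map (·.2)).count v = 0 then none
        else some (fmt v (((pre.map (·.2)).count v : Int) + 1)) := by
  set hm := pre ++ (k, v) :: post with hhm
  have hkv : (k, v) ∈ hm := by simp [hhm]
  have hkpre : k ∉ pre.map (·.1) := by
    simp only [hhm, List.map_append, List.nodup_append, List.map_cons] at h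
    exact fun hm' => h.2.2 k hm' k (by simp) rfl
  have hkpost : k ∉ post.map (·.1) := by
    simp only [hhm, List.map_append, List.nodup_append, List.map_cons, List.nodup_cons] at h
    exact h.2.1.1
  have hvc : ∀ c, k ∈ keysOf hm c → c = v := by
    intro c hkc
    exact val_unique hm h ((mem_keysOf hm c k).1 hkc) hkv
  -- decompose keysOf hm v
  have hdecomp : keysOf hm v
      = (pre.filter (fun p => p.2 == v)).map (·.1) ++ k :: (post.filter (fun p => p.2 == v)).map (·.1) := by
    simp [keysOf, hhm, List.filter_append]
  set A := (pre.filter (fun p => p.2 == v)).map (·.1) with hA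
  set B := (post.filter (fun p => p.2 == v)).map (·.1) with hB
  have hkA : k ∉ A := by
    intro hk
    apply hkpre
    rw [hA] at hk
    obtain ⟨p, hp, rfl⟩ := List.mem_map.mp hk
    exact List.mem_map_of_mem (List.mem_of_mem_filter hp)
  have hkB : k ∉ B := by
    intro hk
    apply hkpost
    rw [hB] at hk
    obtain ⟨p, hp, rfl⟩ := List.mem_map.mp hk
    exact List.mem_map_of_mem (List.mem_of_mem_filter hp)
  have hcnt : (pre.map (·.2)).count v = A.length := by
    rw [hA, List.length_map, List.count, List.countP_map, List.countP_eq_length_filter]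
    rfl
  -- decompose valsOf hm
  have hv : v ∈ valsOf hm := by
    rw [valsOf, PySem.Set.mem_ofList]
    exact List.mem_map_of_mem hkv
  obtain ⟨V1, V2, hV⟩ := List.append_of_mem hv
  have hndV : (V1 ++ v :: V2).Nodup := hV ▸ PySem.Set.nodup_ofList _
  have hvV1 : v ∉ V1 := by
    simp only [List.nodup_append, List.nodup_cons] at hndV
    exact fun hm' => hndV.2.2 v hm' v (by simp) rfl
  have hvV2 : v ∉ V2 := by
    simp only [List.nodup_append, List.nodup_cons] at hndV
    exact hndV.2.1.1
  rw [asgOf_eq_flatMap_chunk, hV, List.flatMap_append, List.flatMap_cons]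
  rw [get?_mk_append_notmem _ _ _ (by
    rw [flatMap_chunk_keys]
    intro hk
    obtain ⟨c, hc, hkc⟩ := List.mem_flatMap.mp hk
    exact hvV1 ((hvc c (List.mem_of_mem_drop hkc)) ▸ hc))]
  by_cases h0 : (pre.map (·.2)).count v = 0
  · -- A = [], k is first of its group: no rename entry
    have hA0 : A = [] := List.length_eq_zero_iff.mp (by omega)
    rw [if_pos h0]
    rw [get?_mk_append_notmem _ _ _ (by
      rw [chunk_keys, hdecomp, hA0]
      simpa using hkB)]
    exact get?_flatMap_none hm k v hvc V2 hvV2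
  · rw [if_neg h0]
    obtain ⟨a, A', hAcons⟩ : ∃ a A', A = a :: A' := by
      cases hAeq : A with
      | nil => rw [hAeq] at hcnt; simp at hcnt; omega
      | cons a A' => exact ⟨a, A', rfl⟩
    have hchunk : (PySem.Dict.mk (chunkFn hm v)).get? k
        = some (fmt v ((0 : Int) + A'.length + 2)) := by
      rw [chunkFn, hdecomp, hAcons]
      have : ((a :: A' ++ k :: B).drop 1) = A' ++ k :: B := by simp
      rw [this]
      exact get?_chunk_found (fun i => fmt v (i + 2)) k B A' 0 (by
        intro hk; exact hkA (hAcons ▸ List.mem_cons_of_mem a hk))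
    rw [get?_mk_append_mem _ _ _ _ hchunk]
    congr 2
    have : A.length = A'.length + 1 := by rw [hAcons]; simp
    rw [hcnt, this]
    push_cast
    ring

theorem map_lookup_eq_refRun (hmAll : List (String × String))
    (h : (hmAll.map (·.1)).Nodup) :
    ∀ (rest pre : List (String × String)), hmAll = pre ++ rest →
    rest.map (fun p => ((PySem.Dict.mk (asgOf hmAll)).get? p.1).elim p (fun w => (p.1, w)))
      = refRun (pre.map (·.2)) rest := by
  intro rest
  induction rest with
  | nil => intro pre _; rfl
  | cons p r ih =>
    intro pre hsplit
    obtain ⟨k, v⟩ := p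
    rw [List.map_cons, refRun]
    have hlk := lookup_asg pre r k v (by rw [← hsplit]; exact h)
    rw [← hsplit] at hlk
    congr 1
    · show ((PySem.Dict.mk (asgOf hmAll)).get? k).elim (k, v) (fun w => (k, w)) = _
      rw [hlk]
      by_cases h0 : ((pre.map (·.2)).count v) = 0
      · rw [if_pos h0]
        simp [finalVal, h0]
      · rw [if_neg h0]
        rw [finalVal, if_pos (by omega)]
        rfl
    · rw [ih (pre ++ [(k, v)]) (by rw [hsplit]; simp)]
      congr 1
      simp

theorem B_eq_ref (hm : List (String × String)) (h : (hm.map (·.1)).Nodup) :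
    dedupDict_alt hm = refRun [] hm := by
  rw [B_unfold hm h]
  rw [foldl_insert_items (asgOf hm) hm h (nodup_asg_keys hm h) (by
    intro q hq
    have : q.1 ∈ (asgOf hm).map (·.1) := List.mem_map_of_mem hq
    rw [asg_keys] at this
    obtain ⟨c, _, hkc⟩ := List.mem_flatMap.mp this
    have := (mem_keysOf hm c q.1).1 (List.mem_of_mem_drop hkc)
    exact List.mem_map.mpr ⟨(q.1, c), this, rfl⟩)]
  exact map_lookup_eq_refRun hm h hm [] rfl

-- ===== VERDICT (by name: the statement is the Claim_ definition above) =====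
theorem dedupDict_spec : Claim_equal_dedupDict := by
  intro hm _ hpre
  unfold Spec_dedupDict
  rw [A_eq_ref hm hpre, B_eq_ref hm hpre]
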